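-- pv_equiv track=rewrite | github.com/wd-zjx/LivePoolAid | Validator.py | validate_circles
-- ===== SOURCE A (Python) =====
-- def validate_circles(frame_list):
--     overlapping = set()
--     for i, frame1 in enumerate(frame_list):
--         sframe1 = set(frame1)
--         for j, frame2 in enumerate(frame_list):
--             if i != j:
--                 overlap = sframe1 - set(frame2)
--                 overlapping = overlapping | overlap
--     return overlapping
-- ===== SOURCE B (Python) =====
-- def validate_circles(frame_list):
--     # Compare every frame against the FIRST frame only (two linear passes)
--     # instead of all O(n^2) ordered pairs:
--     #  - an element of frame 0 is "overlapping" iff it is missing from some later frame;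
--     #  - an element not in frame 0 is "overlapping" as soon as it appears anywhere.
--     if not frame_list:
--         return set()
--     sfirst = set(frame_list[0])
--     rest = frame_list[1:]
--     out = set()
--     for f in rest:
--         out |= sfirst - set(f)
--     for f in rest:
--         out |= set(f) - sfirst
--     return out
-- ===== Notes on version B (the rewrite author's own statement) =====
-- stated objective: faster
-- what changed: A unions the set difference of every ordered pair of frames (all n*(n-1) pairs); B makes two linear passes that compare each later frame against the first frame only (first-minus-frame, then frame-minus-first).
import Mathlib
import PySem

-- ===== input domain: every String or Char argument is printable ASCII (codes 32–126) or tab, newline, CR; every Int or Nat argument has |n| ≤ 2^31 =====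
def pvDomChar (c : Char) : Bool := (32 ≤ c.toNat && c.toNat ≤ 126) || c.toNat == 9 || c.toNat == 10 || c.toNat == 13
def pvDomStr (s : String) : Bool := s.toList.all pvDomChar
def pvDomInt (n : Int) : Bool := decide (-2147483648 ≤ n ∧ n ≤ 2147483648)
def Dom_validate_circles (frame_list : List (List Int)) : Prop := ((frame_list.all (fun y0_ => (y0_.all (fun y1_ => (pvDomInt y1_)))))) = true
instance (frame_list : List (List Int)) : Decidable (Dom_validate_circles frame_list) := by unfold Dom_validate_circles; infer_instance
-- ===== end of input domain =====

-- B replaces A's O(n^2) all-pairs set differences by two linear passes that compare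
-- every other frame against the first frame only (simpler and asymptotically fewer set operations).

-- ===== PORT A =====
def validate_circles (frame_list : List (List Int)) : List Int :=
  (PySem.List.enumerate frame_list).foldl
    (fun overlapping p =>
      let sframe1 := PySem.Set.ofList p.2
      (PySem.List.enumerate frame_list).foldl
        (fun ov q =>
          if p.1 ≠ q.1 then
            PySem.Set.union ov (PySem.Set.diff sframe1 (PySem.Set.ofList q.2))
          else ov)
        overlapping)
    PySem.Set.empty

-- ===== PORT B =====
def validate_circles_alt (frame_list : List (List Int)) : List Int :=
  match frame_list with
  | [] => PySem.Set.empty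
  | first :: rest =>          -- 'sfirst = set(frame_list[0]); rest = frame_list[1:]'
    let sfirst := PySem.Set.ofList first
    let out := rest.foldl
      (fun out f => PySem.Set.union out (PySem.Set.diff sfirst (PySem.Set.ofList f)))
      PySem.Set.empty
    rest.foldl
      (fun out f => PySem.Set.union out (PySem.Set.diff (PySem.Set.ofList f) sfirst))
      out

-- ===== PRECONDITION & SPEC =====
def Spec_validate_circles (frame_list : List (List Int)) (out : List Int) : Prop := out = validate_circles_alt frame_list
instance (frame_list : List (List Int)) (out : List Int) : Decidable (Spec_validate_circles frame_list out) := by unfold Spec_validate_circles; infer_instance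

-- ===== CLAIM (what is proved, stated in full; the proofs are below) =====
def Claim_equal_validate_circles : Prop := ∀ (frame_list : List (List Int)), Dom_validate_circles frame_list → Spec_validate_circles frame_list (validate_circles frame_list)

-- ===== LEMMAS AND PROOFS =====

-- union with a subset is a no-op
theorem pv_union_eq_self (s t : List Int) (h : ∀ x ∈ t, x ∈ s) :
    PySem.Set.union s t = s := by
  induction t generalizing s with
  | nil => rfl
  | cons x xs ih =>
    show PySem.Set.update s (x :: xs) = s
    rw [PySem.Set.update_cons, PySem.Set.add_of_mem (h x (by simp))]
    exact ih s (fun y hy => h y (by simp [hy]))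

-- folding unions only grows the accumulator
theorem pv_mem_foldl_union (g : List Int → List Int) (l : List (List Int)) (acc : List Int)
    (x : Int) (hx : x ∈ acc) :
    x ∈ l.foldl (fun ov f => PySem.Set.union ov (g f)) acc := by
  induction l generalizing acc with
  | nil => exact hx
  | cons f fs ih => exact ih _ ((PySem.Set.mem_union _ _ _).mpr (Or.inl hx))

theorem pv_mem_foldl_union_of_mem (g : List Int → List Int) (l : List (List Int))
    (x : Int) (fj : List Int) :
    ∀ (acc : List Int), fj ∈ l → x ∈ g fj →
      x ∈ l.foldl (fun ov f => PySem.Set.union ov (g f)) acc := by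
  induction l with
  | nil => intro acc hf _; cases hf
  | cons f fs ih =>
    intro acc hf hx
    rcases List.mem_cons.mp hf with h | h
    · subst h
      exact pv_mem_foldl_union g fs _ x ((PySem.Set.mem_union _ _ _).mpr (Or.inr hx))
    · exact ih _ h hx

-- an indexed fold whose index test is always true is a plain fold
theorem pv_enum_fold_lt (s1 : List Int) (rest : List (List Int)) (i : Int) :
    ∀ (s : Int) (acc : List Int), i < s →
    (PySem.List.enumerate rest s).foldl
      (fun ov q => if i ≠ q.1 then PySem.Set.union ov (PySem.Set.diff s1 (PySem.Set.ofList q.2)) else ov) acc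
    = rest.foldl (fun ov f => PySem.Set.union ov (PySem.Set.diff s1 (PySem.Set.ofList f))) acc := by
  induction rest with
  | nil => intro s acc _; rfl
  | cons f fs ih =>
    intro s acc hs
    rw [PySem.List.enumerate_cons]
    simp only [List.foldl_cons]
    rw [if_pos (by omega : i ≠ s)]
    exact ih (s + 1) _ (by omega)

-- once the accumulator already contains every element any difference could add, the fold is a no-op
theorem pv_inner_tail_id (si acc : List Int) (i : Int) :
    ∀ (rest : List (List Int)) (s : Int),
      (∀ fj ∈ rest, ∀ x ∈ PySem.Set.diff si (PySem.Set.ofList fj), x ∈ acc) →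
      (PySem.List.enumerate rest s).foldl
        (fun ov q => if i ≠ q.1 then PySem.Set.union ov (PySem.Set.diff si (PySem.Set.ofList q.2)) else ov) acc = acc := by
  intro rest
  induction rest with
  | nil => intro s _; rfl
  | cons f fs ih =>
    intro s hsub
    rw [PySem.List.enumerate_cons]
    simp only [List.foldl_cons]
    have hstep : (if i ≠ s then PySem.Set.union acc (PySem.Set.diff si (PySem.Set.ofList f)) else acc) = acc := by
      split
      · exact pv_union_eq_self _ _ (hsub f (by simp))
      · rfl
    rw [hstep]
    exact ih (s + 1) (fun fj hfj => hsub fj (by simp [hfj]))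

-- a full inner pass of A (index i ≥ 1) adds exactly (set(frame_i) - set(frame_0))
theorem pv_inner_eq (f0 si acc : List Int) (rest : List (List Int)) (i : Int)
    (hi : 1 ≤ i)
    (hacc : ∀ fj ∈ rest, ∀ x, x ∈ si → x ∉ PySem.Set.ofList fj → x ∈ PySem.Set.ofList f0 → x ∈ acc) :
    (((0 : Int), f0) :: PySem.List.enumerate rest 1).foldl
      (fun ov q => if i ≠ q.1 then PySem.Set.union ov (PySem.Set.diff si (PySem.Set.ofList q.2)) else ov) acc
    = PySem.Set.union acc (PySem.Set.diff si (PySem.Set.ofList f0)) := by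
  simp only [List.foldl_cons]
  rw [if_pos (by omega : i ≠ ((0 : Int), f0).1)]
  apply pv_inner_tail_id
  intro fj hfj x hx
  have hxd := (PySem.Set.mem_diff _ _ _).mp hx
  by_cases hx0 : x ∈ PySem.Set.ofList f0
  · exact (PySem.Set.mem_union _ _ _).mpr (Or.inl (hacc fj hfj x hxd.1 hxd.2 hx0))
  · exact (PySem.Set.mem_union _ _ _).mpr (Or.inr ((PySem.Set.mem_diff _ _ _).mpr ⟨hxd.1, hx0⟩))

-- A's passes i = 1 … n-1 together are B's second fold
theorem pv_outer_eq (f0 : List Int) (rest : List (List Int)) :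
    ∀ (rest' : List (List Int)) (s : Int) (acc : List Int), 1 ≤ s →
      (∀ fj ∈ rest, ∀ x, x ∈ PySem.Set.ofList f0 → x ∉ PySem.Set.ofList fj → x ∈ acc) →
      (PySem.List.enumerate rest' s).foldl
        (fun ov p =>
          (((0 : Int), f0) :: PySem.List.enumerate rest 1).foldl
            (fun ov2 q =>
              if p.1 ≠ q.1 then
                PySem.Set.union ov2 (PySem.Set.diff (PySem.Set.ofList p.2) (PySem.Set.ofList q.2))
              else ov2) ov) acc
      = rest'.foldl (fun ov f => PySem.Set.union ov (PySem.Set.diff (PySem.Set.ofList f) (PySem.Set.ofList f0))) acc := by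
  intro rest'
  induction rest' with
  | nil => intro s acc _ _; rfl
  | cons f fs ih =>
    intro s acc hs hacc
    rw [PySem.List.enumerate_cons, List.foldl_cons]
    dsimp only
    rw [pv_inner_eq f0 (PySem.Set.ofList f) acc rest s hs
      (fun fj hfj x _ hxnj hx0 => hacc fj hfj x hx0 hxnj)]
    exact ih (s + 1) _ (by omega)
      (fun fj hfj x hx0 hxnj => (PySem.Set.mem_union _ _ _).mpr (Or.inl (hacc fj hfj x hx0 hxnj)))

-- ===== VERDICT (by name: the statement is the Claim_ definition above) =====
theorem validate_circles_spec : Claim_equal_validate_circles := by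
  intro frame_list _
  unfold Spec_validate_circles
  cases frame_list with
  | nil => rfl
  | cons f0 rest =>
    unfold validate_circles validate_circles_alt
    rw [PySem.List.enumerate_cons]
    simp only [zero_add]
    rw [List.foldl_cons]
    dsimp only
    rw [List.foldl_cons]
    rw [if_neg (by omega : ¬ ((0 : Int) ≠ (0 : Int)))]
    rw [pv_enum_fold_lt (PySem.Set.ofList f0) rest 0 1 PySem.Set.empty (by omega)]
    exact pv_outer_eq f0 rest rest 1 _ (by omega)
      (fun fj hfj x hx0 hxnj =>
        pv_mem_foldl_union_of_mem (fun f => PySem.Set.diff (PySem.Set.ofList f0) (PySem.Set.ofList f))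
          rest x fj _ hfj ((PySem.Set.mem_diff _ _ _).mpr ⟨hx0, hxnj⟩))
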